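-- pv_equiv track=rewrite | github.com/ABHINAY-TOMAR/ELDER | app/engines/implementation_planner.py | estimate_service_complexity
-- ===== SOURCE A (Python) =====
-- from typing import List, Dict, Set, Optional
--
-- SERVICE_COMPLEXITY = {
--     "auth": "high",
--     "payment": "critical",
--     "billing": "high",
--     "transaction": "critical",
--     "order": "medium",
--     "inventory": "medium",
--     "product": "low",
--     "user": "medium",
--     "notification": "low",
--     "email": "low",
--     "sms": "low",
--     "analytics": "medium",
--     "search": "high",
--     "recommendation": "critical",
--     "ai": "critical",
--     "ml": "critical",
--     "gateway": "medium",
--     "api": "medium",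
--     "cache": "low",
--     "database": "medium",
--     "queue": "medium",
--     "stream": "high",
--     "websocket": "medium",
-- }
--
-- def estimate_service_complexity(service_ids: List[str]) -> str:
--     max_complexity = "low"
--     for sid in service_ids:
--         sid_lower = sid.lower()
--         for key, complexity in SERVICE_COMPLEXITY.items():
--             if key in sid_lower:
--                 if complexity == "critical":
--                     return "critical"
--                 elif complexity == "high" and max_complexity != "critical":
--                     max_complexity = "high"
--                 elif complexity == "medium" and max_complexity in ["low"]:
--                     max_complexity = "medium"
--     return max_complexity
-- ===== SOURCE B (Python) =====
-- SERVICE_COMPLEXITY = {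
--     "auth": "high",
--     "payment": "critical",
--     "billing": "high",
--     "transaction": "critical",
--     "order": "medium",
--     "inventory": "medium",
--     "product": "low",
--     "user": "medium",
--     "notification": "low",
--     "email": "low",
--     "sms": "low",
--     "analytics": "medium",
--     "search": "high",
--     "recommendation": "critical",
--     "ai": "critical",
--     "ml": "critical",
--     "gateway": "medium",
--     "api": "medium",
--     "cache": "low",
--     "database": "medium",
--     "queue": "medium",
--     "stream": "high",
--     "websocket": "medium",
-- }
--
-- def estimate_service_complexity(service_ids):
--     # Phase 1: collect every complexity level that any service id matches.
--     found = set()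
--     for sid in service_ids:
--         s = sid.lower()
--         for key, complexity in SERVICE_COMPLEXITY.items():
--             if key in s:
--                 found.add(complexity)
--     # Phase 2: return the highest-priority level that was found.
--     for level in ["critical", "high", "medium"]:
--         if level in found:
--             return level
--     return "low"
-- ===== Notes on version B (the rewrite author's own statement) =====
-- stated objective: simpler
-- what changed: Replaced the accumulate-and-branch loop with running-best state and early return by two separate phases: first collect the set of matched complexity levels, then return the first level of a fixed priority list that was found.
import Mathlib
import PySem

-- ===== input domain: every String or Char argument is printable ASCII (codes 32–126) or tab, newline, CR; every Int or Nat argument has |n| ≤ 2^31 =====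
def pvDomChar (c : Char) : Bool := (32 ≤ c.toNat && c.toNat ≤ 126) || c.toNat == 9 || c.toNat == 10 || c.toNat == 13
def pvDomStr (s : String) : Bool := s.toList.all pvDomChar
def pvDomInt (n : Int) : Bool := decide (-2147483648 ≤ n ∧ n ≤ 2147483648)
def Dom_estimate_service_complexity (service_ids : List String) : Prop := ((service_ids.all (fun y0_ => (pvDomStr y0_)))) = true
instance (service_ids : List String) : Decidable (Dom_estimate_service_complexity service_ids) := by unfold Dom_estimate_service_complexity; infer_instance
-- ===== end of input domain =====

-- B separates detection from ranking: collect the set of matched levels, then scan a fixed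
-- priority list — instead of A's merged accumulate-and-branch loop with early return (objective: simpler).

-- module constant SERVICE_COMPLEXITY (dict in insertion order)
def pvServiceComplexity : List (String × String) :=
  [("auth", "high"), ("payment", "critical"), ("billing", "high"), ("transaction", "critical"),
   ("order", "medium"), ("inventory", "medium"), ("product", "low"), ("user", "medium"),
   ("notification", "low"), ("email", "low"), ("sms", "low"), ("analytics", "medium"),
   ("search", "high"), ("recommendation", "critical"), ("ai", "critical"), ("ml", "critical"),
   ("gateway", "medium"), ("api", "medium"), ("cache", "low"), ("database", "medium"),
   ("queue", "medium"), ("stream", "high"), ("websocket", "medium")]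

-- ===== PORT A =====
-- A's inner loop over SERVICE_COMPLEXITY.items(); .inl = early `return "critical"`, .inr = updated max_complexity
def pvInnerA : List (String × String) → String → String → Sum String String
  | [], _, m => .inr m
  | (k, c) :: rest, sidLower, m =>
    if PySem.Str.isIn k sidLower then
      if c = "critical" then .inl "critical"
      else if c = "high" ∧ m ≠ "critical" then pvInnerA rest sidLower "high"
      else if c = "medium" ∧ m = "low" then pvInnerA rest sidLower "medium"
      else pvInnerA rest sidLower m
    else pvInnerA rest sidLower m

-- A's outer loop over service_ids carrying max_complexity
def pvOuterA : List String → String → String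
  | [], m => m
  | sid :: rest, m =>
    match pvInnerA pvServiceComplexity (PySem.Str.lower sid) m with
    | .inl r => r
    | .inr m' => pvOuterA rest m'

def estimate_service_complexity (service_ids : List String) : String :=
  pvOuterA service_ids "low"

-- ===== PORT B =====
-- phase 1: found = set of every complexity level matched by some service id
def pvFoundB (service_ids : List String) : PySem.Set String :=
  service_ids.foldl (fun acc sid =>
    pvServiceComplexity.foldl (fun acc2 kc =>
      if PySem.Str.isIn kc.1 (PySem.Str.lower sid) then PySem.Set.add acc2 kc.2 else acc2) acc)
    PySem.Set.empty

-- phase 2: first level of the priority list that was found, default "low"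
def pvRankB : List String → PySem.Set String → String
  | [], _ => "low"
  | l :: rest, found => if PySem.Set.contains found l then l else pvRankB rest found

def estimate_service_complexity_alt (service_ids : List String) : String :=
  pvRankB ["critical", "high", "medium"] (pvFoundB service_ids)

-- ===== PRECONDITION & SPEC =====
def Spec_estimate_service_complexity (service_ids : List String) (out : String) : Prop := out = estimate_service_complexity_alt service_ids
instance (service_ids : List String) (out : String) : Decidable (Spec_estimate_service_complexity service_ids out) := by unfold Spec_estimate_service_complexity; infer_instance

-- ===== CLAIM (what is proved, stated in full; the proofs are below) =====
def Claim_equal_estimate_service_complexity : Prop := ∀ (service_ids : List String), Dom_estimate_service_complexity service_ids → Spec_estimate_service_complexity service_ids (estimate_service_complexity service_ids)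

-- ===== LEMMAS AND PROOFS =====

-- numeric rank of a complexity level
def pvRank (c : String) : Nat :=
  if c = "critical" then 3 else if c = "high" then 2 else if c = "medium" then 1 else 0

def pvUnrank (n : Nat) : String :=
  if 3 ≤ n then "critical" else if n = 2 then "high" else if n = 1 then "medium" else "low"

-- max rank matched by one (lowered) sid over a table
def pvSidScore (ts : List (String × String)) (sid : String) : Nat :=
  ts.foldr (fun kc acc => if PySem.Str.isIn kc.1 sid then max (pvRank kc.2) acc else acc) 0

def pvScore (ids : List String) : Nat :=
  ids.foldr (fun sid acc => max (pvSidScore pvServiceComplexity (PySem.Str.lower sid)) acc) 0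

theorem pvTable_vals : ∀ kc ∈ pvServiceComplexity,
    kc.2 = "critical" ∨ kc.2 = "high" ∨ kc.2 = "medium" ∨ kc.2 = "low" := by decide

theorem pvInnerA_eq (ts : List (String × String)) (sid m : String)
    (hts : ∀ kc ∈ ts, kc.2 = "critical" ∨ kc.2 = "high" ∨ kc.2 = "medium" ∨ kc.2 = "low")
    (hm : m = "low" ∨ m = "medium" ∨ m = "high") :
    pvInnerA ts sid m =
      if 3 ≤ pvSidScore ts sid then .inl "critical"
      else .inr (pvUnrank (max (pvRank m) (pvSidScore ts sid))) := by
  induction ts generalizing m with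
  | nil =>
      rcases hm with rfl | rfl | rfl <;> simp [pvInnerA, pvSidScore, pvRank, pvUnrank]
  | cons kc rest ih =>
      obtain ⟨k, c⟩ := kc
      have hrest : ∀ kc ∈ rest, kc.2 = "critical" ∨ kc.2 = "high" ∨ kc.2 = "medium" ∨ kc.2 = "low" :=
        fun kc h => hts kc (List.mem_cons_of_mem _ h)
      have hc : c = "critical" ∨ c = "high" ∨ c = "medium" ∨ c = "low" :=
        hts (k, c) (List.mem_cons_self ..)
      by_cases hin : PySem.Str.isIn k sid
      · have hin' : PySem.Chars.isIn k.toList sid.toList = true := by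
          have := hin; simp [PySem.Str.isIn] at this; exact this
        have hscons : pvSidScore ((k, c) :: rest) sid = max (pvRank c) (pvSidScore rest sid) := by
          unfold pvSidScore; rw [List.foldr_cons, if_pos hin]
        rw [hscons]
        rcases hc with rfl | rfl | rfl | rfl
        · -- critical: early return
          have hL : pvInnerA ((k, "critical") :: rest) sid m = .inl "critical" := by
            simp [pvInnerA, hin']
          rw [hL, if_pos (show 3 ≤ max (pvRank "critical") (pvSidScore rest sid) by
            have e : pvRank "critical" = 3 := by decide
            omega)]
        · -- high
          have hm' : m ≠ "critical" := by rcases hm with rfl | rfl | rfl <;> decide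
          have hL : pvInnerA ((k, "high") :: rest) sid m = pvInnerA rest sid "high" := by
            simp [pvInnerA, hin', hm']
          rw [hL, ih "high" hrest (Or.inr (Or.inr rfl))]
          have e1 : pvRank "high" = 2 := by decide
          have hrm : pvRank m ≤ 2 := by rcases hm with rfl | rfl | rfl <;> decide
          by_cases h3 : 3 ≤ pvSidScore rest sid
          · rw [if_pos h3, if_pos (show 3 ≤ max (pvRank "high") (pvSidScore rest sid) by omega)]
          · rw [if_neg h3, if_neg (show ¬ 3 ≤ max (pvRank "high") (pvSidScore rest sid) by omega)]
            have harg : max (pvRank "high") (pvSidScore rest sid)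
                = max (pvRank m) (max (pvRank "high") (pvSidScore rest sid)) := by omega
            rw [← harg]
        · -- medium
          by_cases hml : m = "low"
          · subst hml
            have hL : pvInnerA ((k, "medium") :: rest) sid "low" = pvInnerA rest sid "medium" := by
              simp [pvInnerA, hin']
            rw [hL, ih "medium" hrest (Or.inr (Or.inl rfl))]
            have e1 : pvRank "medium" = 1 := by decide
            have e2 : pvRank "low" = 0 := by decide
            by_cases h3 : 3 ≤ pvSidScore rest sid
            · rw [if_pos h3, if_pos (show 3 ≤ max (pvRank "medium") (pvSidScore rest sid) by omega)]
            · rw [if_neg h3, if_neg (show ¬ 3 ≤ max (pvRank "medium") (pvSidScore rest sid) by omega)]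
              have harg : max (pvRank "medium") (pvSidScore rest sid)
                = max (pvRank "low") (max (pvRank "medium") (pvSidScore rest sid)) := by omega
              rw [← harg]
          · have hL : pvInnerA ((k, "medium") :: rest) sid m = pvInnerA rest sid m := by
              simp [pvInnerA, hin', hml]
            rw [hL, ih m hrest hm]
            have e1 : pvRank "medium" = 1 := by decide
            have h1 : 1 ≤ pvRank m := by
              rcases hm with rfl | rfl | rfl
              · exact absurd rfl hml
              · decide
              · decide
            by_cases h3 : 3 ≤ pvSidScore rest sid
            · rw [if_pos h3, if_pos (show 3 ≤ max (pvRank "medium") (pvSidScore rest sid) by omega)]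
            · rw [if_neg h3, if_neg (show ¬ 3 ≤ max (pvRank "medium") (pvSidScore rest sid) by omega)]
              have harg : max (pvRank m) (pvSidScore rest sid)
                = max (pvRank m) (max (pvRank "medium") (pvSidScore rest sid)) := by omega
              rw [← harg]
        · -- low: no branch fires
          have hL : pvInnerA ((k, "low") :: rest) sid m = pvInnerA rest sid m := by
            simp [pvInnerA, hin']
          rw [hL, ih m hrest hm]
          have e1 : pvRank "low" = 0 := by decide
          by_cases h3 : 3 ≤ pvSidScore rest sid
          · rw [if_pos h3, if_pos (show 3 ≤ max (pvRank "low") (pvSidScore rest sid) by omega)]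
          · rw [if_neg h3, if_neg (show ¬ 3 ≤ max (pvRank "low") (pvSidScore rest sid) by omega)]
            have harg : max (pvRank m) (pvSidScore rest sid)
                = max (pvRank m) (max (pvRank "low") (pvSidScore rest sid)) := by omega
            rw [← harg]
      · have hin' : PySem.Chars.isIn k.toList sid.toList = false := by
          have := hin; simp [PySem.Str.isIn] at this; simpa using this
        have hscons : pvSidScore ((k, c) :: rest) sid = pvSidScore rest sid := by
          unfold pvSidScore; rw [List.foldr_cons, if_neg hin]
        have hL : pvInnerA ((k, c) :: rest) sid m = pvInnerA rest sid m := by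
          simp [pvInnerA, hin']
        rw [hscons, hL, ih m hrest hm]

theorem pvUnrank_mem (n : Nat) (h : n ≤ 2) :
    pvUnrank n = "low" ∨ pvUnrank n = "medium" ∨ pvUnrank n = "high" := by
  interval_cases n <;> simp [pvUnrank]

theorem pvRank_unrank (n : Nat) (h : n ≤ 2) : pvRank (pvUnrank n) = n := by
  interval_cases n <;> decide

theorem pvOuterA_eq (ids : List String) (m : String)
    (hm : m = "low" ∨ m = "medium" ∨ m = "high") :
    pvOuterA ids m = pvUnrank (max (pvRank m) (pvScore ids)) := by
  induction ids generalizing m with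
  | nil =>
      rcases hm with rfl | rfl | rfl <;> simp [pvOuterA, pvScore, pvRank, pvUnrank]
  | cons sid rest ih =>
      have hsc : pvScore (sid :: rest) = max (pvSidScore pvServiceComplexity (PySem.Str.lower sid)) (pvScore rest) := by
        simp [pvScore]
      set s := pvSidScore pvServiceComplexity (PySem.Str.lower sid) with hsdef
      have hrm : pvRank m ≤ 2 := by rcases hm with rfl | rfl | rfl <;> decide
      simp only [pvOuterA]
      rw [pvInnerA_eq pvServiceComplexity (PySem.Str.lower sid) m pvTable_vals hm]
      by_cases h3 : 3 ≤ s
      · rw [if_pos h3]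
        have h33 : 3 ≤ max (pvRank m) (pvScore (sid :: rest)) := by rw [hsc]; omega
        show "critical" = pvUnrank (max (pvRank m) (pvScore (sid :: rest)))
        simp only [pvUnrank, if_pos h33]
      · rw [if_neg h3]
        have hle : max (pvRank m) s ≤ 2 := by omega
        show pvOuterA rest (pvUnrank (max (pvRank m) s)) = pvUnrank (max (pvRank m) (pvScore (sid :: rest)))
        rw [ih _ (pvUnrank_mem _ hle), pvRank_unrank _ hle, hsc]
        congr 1
        omega

-- score characterisation: k ≤ pvSidScore ↔ some matched pair has rank ≥ k  (k ≥ 1)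
theorem le_pvSidScore_iff (ts : List (String × String)) (sid : String) (k : Nat) (hk : 1 ≤ k) :
    k ≤ pvSidScore ts sid ↔ ∃ kc ∈ ts, PySem.Str.isIn kc.1 sid = true ∧ k ≤ pvRank kc.2 := by
  induction ts with
  | nil => simp [pvSidScore]; omega
  | cons kc rest ih =>
      simp only [pvSidScore, List.foldr_cons] at *
      by_cases hin : PySem.Str.isIn kc.1 sid
      · rw [if_pos hin]
        constructor
        · intro h
          by_cases hr : k ≤ pvRank kc.2
          · exact ⟨kc, List.mem_cons_self, hin, hr⟩
          · have : k ≤ pvSidScore rest sid := by unfold pvSidScore; omega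
            obtain ⟨kc', hmem, hin', hr'⟩ := ih.mp this
            exact ⟨kc', List.mem_cons_of_mem _ hmem, hin', hr'⟩
        · rintro ⟨kc', hmem, hin', hr'⟩
          rcases List.mem_cons.mp hmem with rfl | hmem'
          · omega
          · have := ih.mpr ⟨kc', hmem', hin', hr'⟩
            unfold pvSidScore at this; omega
      · rw [if_neg hin]
        rw [ih]
        constructor
        · rintro ⟨kc', hmem, hin', hr'⟩; exact ⟨kc', List.mem_cons_of_mem _ hmem, hin', hr'⟩
        · rintro ⟨kc', hmem, hin', hr'⟩
          rcases List.mem_cons.mp hmem with rfl | hmem'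
          · exact absurd hin' hin
          · exact ⟨kc', hmem', hin', hr'⟩

theorem le_pvScore_iff (ids : List String) (k : Nat) (hk : 1 ≤ k) :
    k ≤ pvScore ids ↔ ∃ sid ∈ ids, ∃ kc ∈ pvServiceComplexity,
      PySem.Str.isIn kc.1 (PySem.Str.lower sid) = true ∧ k ≤ pvRank kc.2 := by
  induction ids with
  | nil => simp [pvScore]; omega
  | cons sid rest ih =>
      simp only [pvScore, List.foldr_cons] at *
      constructor
      · intro h
        by_cases hs : k ≤ pvSidScore pvServiceComplexity (PySem.Str.lower sid)
        · obtain ⟨kc, hmem, hin, hr⟩ := (le_pvSidScore_iff _ _ k hk).mp hs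
          exact ⟨sid, List.mem_cons_self, kc, hmem, hin, hr⟩
        · have : k ≤ pvScore rest := by unfold pvScore; omega
          obtain ⟨sid', hmem, rest'⟩ := ih.mp this
          exact ⟨sid', List.mem_cons_of_mem _ hmem, rest'⟩
      · rintro ⟨sid', hmem, kc, hkc, hin, hr⟩
        rcases List.mem_cons.mp hmem with rfl | hmem'
        · have := (le_pvSidScore_iff _ _ k hk).mpr ⟨kc, hkc, hin, hr⟩
          omega
        · have := ih.mpr ⟨sid', hmem', kc, hkc, hin, hr⟩
          unfold pvScore at this; omega

-- membership in B's found set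
theorem mem_pvFoundB_inner (ts : List (String × String)) (sid : String)
    (acc : PySem.Set String) (x : String) :
    x ∈ ts.foldl (fun acc2 kc =>
        if PySem.Str.isIn kc.1 (PySem.Str.lower sid) then PySem.Set.add acc2 kc.2 else acc2) acc ↔
      x ∈ acc ∨ ∃ kc ∈ ts, PySem.Str.isIn kc.1 (PySem.Str.lower sid) = true ∧ kc.2 = x := by
  induction ts generalizing acc with
  | nil => simp
  | cons kc rest ih =>
      simp only [List.foldl_cons]
      by_cases hin : PySem.Str.isIn kc.1 (PySem.Str.lower sid)
      · rw [if_pos hin, ih]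
        simp only [PySem.Set.mem_add, List.mem_cons]
        constructor
        · rintro ((h | rfl) | ⟨kc', hmem, h⟩)
          · exact Or.inl h
          · exact Or.inr ⟨kc, Or.inl rfl, hin, rfl⟩
          · exact Or.inr ⟨kc', Or.inr hmem, h⟩
        · rintro (h | ⟨kc', (rfl | hmem), hin', rfl⟩)
          · exact Or.inl (Or.inl h)
          · exact Or.inl (Or.inr rfl)
          · exact Or.inr ⟨kc', hmem, hin', rfl⟩
      · rw [if_neg hin, ih]
        constructor
        · rintro (h | ⟨kc', hmem, h⟩)
          · exact Or.inl h
          · exact Or.inr ⟨kc', List.mem_cons_of_mem _ hmem, h⟩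
        · rintro (h | ⟨kc', hmem, hin', rfl⟩)
          · exact Or.inl h
          · rcases List.mem_cons.mp hmem with rfl | hmem'
            · exact absurd hin' hin
            · exact Or.inr ⟨kc', hmem', hin', rfl⟩

theorem mem_pvFoundB (ids : List String) (x : String) :
    x ∈ pvFoundB ids ↔ ∃ sid ∈ ids, ∃ kc ∈ pvServiceComplexity,
      PySem.Str.isIn kc.1 (PySem.Str.lower sid) = true ∧ kc.2 = x := by
  unfold pvFoundB
  have gen : ∀ (acc : PySem.Set String),
      x ∈ ids.foldl (fun acc sid =>
        pvServiceComplexity.foldl (fun acc2 kc =>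
          if PySem.Str.isIn kc.1 (PySem.Str.lower sid) then PySem.Set.add acc2 kc.2 else acc2) acc) acc ↔
      x ∈ acc ∨ ∃ sid ∈ ids, ∃ kc ∈ pvServiceComplexity,
        PySem.Str.isIn kc.1 (PySem.Str.lower sid) = true ∧ kc.2 = x := by
    induction ids with
    | nil => simp
    | cons sid rest ih =>
        intro acc
        simp only [List.foldl_cons]
        rw [ih, mem_pvFoundB_inner]
        constructor
        · rintro ((h | h) | ⟨sid', hmem, h⟩)
          · exact Or.inl h
          · exact Or.inr ⟨sid, List.mem_cons_self, h⟩
          · exact Or.inr ⟨sid', List.mem_cons_of_mem _ hmem, h⟩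
        · rintro (h | ⟨sid', hmem, h⟩)
          · exact Or.inl (Or.inl h)
          · rcases List.mem_cons.mp hmem with rfl | hmem'
            · exact Or.inl (Or.inr h)
            · exact Or.inr ⟨sid', hmem', h⟩
  rw [gen]
  simp [PySem.Set.empty]

-- per-level bridge between score and found
theorem pv_crit_iff (ids : List String) : 3 ≤ pvScore ids ↔ "critical" ∈ pvFoundB ids := by
  rw [le_pvScore_iff ids 3 (by omega), mem_pvFoundB]
  constructor <;> rintro ⟨sid, hmem, kc, hkc, hin, h⟩
  · refine ⟨sid, hmem, kc, hkc, hin, ?_⟩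
    rcases pvTable_vals kc hkc with h' | h' | h' | h' <;> rw [h'] at h ⊢ <;> first | rfl | (simp [pvRank] at h)
  · exact ⟨sid, hmem, kc, hkc, hin, by rw [h]; decide⟩

theorem pv_two_iff (ids : List String) :
    2 ≤ pvScore ids ↔ "critical" ∈ pvFoundB ids ∨ "high" ∈ pvFoundB ids := by
  rw [le_pvScore_iff ids 2 (by omega), mem_pvFoundB, mem_pvFoundB]
  constructor
  · rintro ⟨sid, hmem, kc, hkc, hin, h⟩
    rcases pvTable_vals kc hkc with h' | h' | h' | h'
    · exact Or.inl ⟨sid, hmem, kc, hkc, hin, h'⟩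
    · exact Or.inr ⟨sid, hmem, kc, hkc, hin, h'⟩
    all_goals (rw [h'] at h; simp [pvRank] at h)
  · rintro (⟨sid, hmem, kc, hkc, hin, h⟩ | ⟨sid, hmem, kc, hkc, hin, h⟩) <;>
      exact ⟨sid, hmem, kc, hkc, hin, by rw [h]; decide⟩

theorem pv_one_iff (ids : List String) :
    1 ≤ pvScore ids ↔ "critical" ∈ pvFoundB ids ∨ "high" ∈ pvFoundB ids ∨ "medium" ∈ pvFoundB ids := by
  rw [le_pvScore_iff ids 1 (by omega), mem_pvFoundB, mem_pvFoundB, mem_pvFoundB]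
  constructor
  · rintro ⟨sid, hmem, kc, hkc, hin, h⟩
    rcases pvTable_vals kc hkc with h' | h' | h' | h'
    · exact Or.inl ⟨sid, hmem, kc, hkc, hin, h'⟩
    · exact Or.inr (Or.inl ⟨sid, hmem, kc, hkc, hin, h'⟩)
    · exact Or.inr (Or.inr ⟨sid, hmem, kc, hkc, hin, h'⟩)
    · rw [h'] at h; simp [pvRank] at h
  · rintro (⟨sid, hmem, kc, hkc, hin, h⟩ | ⟨sid, hmem, kc, hkc, hin, h⟩ | ⟨sid, hmem, kc, hkc, hin, h⟩) <;>
      exact ⟨sid, hmem, kc, hkc, hin, by rw [h]; decide⟩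

-- ===== VERDICT (by name: the statement is the Claim_ definition above) =====
theorem estimate_service_complexity_spec : Claim_equal_estimate_service_complexity := by
  intro ids _
  unfold Spec_estimate_service_complexity estimate_service_complexity estimate_service_complexity_alt
  rw [pvOuterA_eq ids "low" (Or.inl rfl)]
  have hr : pvRank "low" = 0 := by decide
  rw [hr, Nat.zero_max]
  simp only [pvRankB]
  rw [PySem.Set.contains_eq_listContains, PySem.Set.contains_eq_listContains,
      PySem.Set.contains_eq_listContains]
  by_cases hc : "critical" ∈ pvFoundB ids
  · have h3 : 3 ≤ pvScore ids := (pv_crit_iff ids).mpr hc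
    simp [hc, pvUnrank, h3]
  · have h3 : ¬ 3 ≤ pvScore ids := fun h => hc ((pv_crit_iff ids).mp h)
    by_cases hh : "high" ∈ pvFoundB ids
    · have h2 : 2 ≤ pvScore ids := (pv_two_iff ids).mpr (Or.inr hh)
      have : pvScore ids = 2 := by omega
      simp [hc, hh, pvUnrank, this]
    · by_cases hm : "medium" ∈ pvFoundB ids
      · have h1 : 1 ≤ pvScore ids := (pv_one_iff ids).mpr (Or.inr (Or.inr hm))
        have h2 : ¬ 2 ≤ pvScore ids := fun h => by
          rcases (pv_two_iff ids).mp h with h' | h' <;> [exact hc h'; exact hh h']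
        have : pvScore ids = 1 := by omega
        simp [hc, hh, hm, pvUnrank, this]
      · have h1 : ¬ 1 ≤ pvScore ids := fun h => by
          rcases (pv_one_iff ids).mp h with h' | h' | h' <;>
            [exact hc h'; exact hh h'; exact hm h']
        have : pvScore ids = 0 := by omega
        simp [hc, hh, hm, pvUnrank, this]
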